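-- pv_equiv track=rewrite | github.com/1-hiba/Correcteur-ortographique-utilisant-Gemenai-api | FewShotLearning.py | formater_resultat
-- ===== SOURCE A (Python) =====
-- def formater_resultat(result):
--     formatted_text = ""
--
--     if "corrections" in result:
--         formatted_text += "**Corrections grammaticales:**\n"
--         for corr in result["corrections"]:
--             formatted_text += f"- Erreur: {corr['erreur']}\n"
--             formatted_text += f"  Correction: {corr['correction']}\n"
--             formatted_text += f"  Type: {corr['type']}\n\n"
--
--     if "suggestions" in result:
--         formatted_text += "**Suggestions de style:**\n"
--         for sugg in result["suggestions"]:
--             formatted_text += f"- Original: {sugg['original']}\n"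
--             formatted_text += f"  Suggestion: {sugg['suggestion']}\n"
--             formatted_text += f"  Type: {sugg['type']}\n\n"
--
--     if "ajustements" in result:
--         formatted_text += "**Ajustements de ton:**\n"
--         for adj in result["ajustements"]:
--             formatted_text += f"- Original: {adj['original']}\n"
--             formatted_text += f"  Ajustement: {adj['ajustement']}\n"
--             formatted_text += f"  Type: {adj['type']}\n\n"
--
--     if "suggestions_generales" in result:
--         formatted_text += "**Suggestions générales:**\n"
--         for sugg in result["suggestions_generales"]:
--             formatted_text += f"- Original: {sugg['original']}\n"
--             formatted_text += f"  Suggestion: {sugg['suggestion']}\n"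
--             formatted_text += f"  Type: {sugg['type']}\n\n"
--
--     return formatted_text if formatted_text else "Aucune correction ou suggestion trouvée."
-- ===== SOURCE B (Python) =====
-- def formater_resultat(result):
--     sections = [
--         ("corrections", "**Corrections grammaticales:**",
--          [("- Erreur: ", "erreur"), ("  Correction: ", "correction"), ("  Type: ", "type")]),
--         ("suggestions", "**Suggestions de style:**",
--          [("- Original: ", "original"), ("  Suggestion: ", "suggestion"), ("  Type: ", "type")]),
--         ("ajustements", "**Ajustements de ton:**",
--          [("- Original: ", "original"), ("  Ajustement: ", "ajustement"), ("  Type: ", "type")]),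
--         ("suggestions_generales", "**Suggestions générales:**",
--          [("- Original: ", "original"), ("  Suggestion: ", "suggestion"), ("  Type: ", "type")]),
--     ]
--     parts = []
--     for key, header, fields in sections:
--         if key in result:
--             parts.append(header + "\n")
--             for item in result[key]:
--                 for label, fkey in fields:
--                     parts.append(label + item[fkey] + "\n")
--                 parts.append("\n")
--     return "".join(parts) if parts else "Aucune correction ou suggestion trouvée."
-- ===== Notes on version B (the rewrite author's own statement) =====
-- stated objective: idiomatic
-- what changed: Replaces four copy-pasted inline string-accumulating branches with a single data-driven pass over a configuration table of (key, header, [(label, field)]) specs, collecting lines in a list and joining once at the end.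
import Mathlib
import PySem

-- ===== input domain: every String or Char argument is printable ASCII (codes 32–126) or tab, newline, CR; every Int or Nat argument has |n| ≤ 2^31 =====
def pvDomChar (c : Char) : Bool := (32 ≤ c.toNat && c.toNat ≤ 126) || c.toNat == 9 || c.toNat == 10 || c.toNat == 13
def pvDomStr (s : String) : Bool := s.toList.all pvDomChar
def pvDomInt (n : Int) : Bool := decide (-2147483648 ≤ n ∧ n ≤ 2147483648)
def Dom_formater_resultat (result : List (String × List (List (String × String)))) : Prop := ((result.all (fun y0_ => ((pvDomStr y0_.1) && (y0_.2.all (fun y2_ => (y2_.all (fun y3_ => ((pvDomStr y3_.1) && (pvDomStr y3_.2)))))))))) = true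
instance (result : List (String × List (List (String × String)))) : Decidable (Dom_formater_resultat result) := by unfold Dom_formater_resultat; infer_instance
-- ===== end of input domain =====

-- B replaces A's four copy-pasted accumulation branches by one data-driven pass over a
-- (key, header, [(label, field)]) table, collecting parts in a list joined once at the end (idiomatic, same cost).

-- ===== PORT A =====
-- Python d[k] on a str→str dict: first match; KeyError (missing field) is excluded by Pre_, so the
-- total form `(·.lookup k).getD ""` is exact on Pre_.
def formater_resultat (result : List (String × List (List (String × String)))) : String :=
  let ft : String := ""
  let ft : String :=
    match result.lookup "corrections" with
    | none => ft
    | some items =>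
        items.foldl (fun acc corr =>
          acc ++ "- Erreur: " ++ (corr.lookup "erreur").getD "" ++ "\n"
              ++ "  Correction: " ++ (corr.lookup "correction").getD "" ++ "\n"
              ++ "  Type: " ++ (corr.lookup "type").getD "" ++ "\n\n")
          (ft ++ "**Corrections grammaticales:**\n")
  let ft : String :=
    match result.lookup "suggestions" with
    | none => ft
    | some items =>
        items.foldl (fun acc sugg =>
          acc ++ "- Original: " ++ (sugg.lookup "original").getD "" ++ "\n"
              ++ "  Suggestion: " ++ (sugg.lookup "suggestion").getD "" ++ "\n"
              ++ "  Type: " ++ (sugg.lookup "type").getD "" ++ "\n\n")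
          (ft ++ "**Suggestions de style:**\n")
  let ft : String :=
    match result.lookup "ajustements" with
    | none => ft
    | some items =>
        items.foldl (fun acc adj =>
          acc ++ "- Original: " ++ (adj.lookup "original").getD "" ++ "\n"
              ++ "  Ajustement: " ++ (adj.lookup "ajustement").getD "" ++ "\n"
              ++ "  Type: " ++ (adj.lookup "type").getD "" ++ "\n\n")
          (ft ++ "**Ajustements de ton:**\n")
  let ft : String :=
    match result.lookup "suggestions_generales" with
    | none => ft
    | some items =>
        items.foldl (fun acc sugg =>
          acc ++ "- Original: " ++ (sugg.lookup "original").getD "" ++ "\n"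
              ++ "  Suggestion: " ++ (sugg.lookup "suggestion").getD "" ++ "\n"
              ++ "  Type: " ++ (sugg.lookup "type").getD "" ++ "\n\n")
          (ft ++ "**Suggestions générales:**\n")
  if ft = "" then "Aucune correction ou suggestion trouvée." else ft

-- ===== PORT B =====
def pvSections : List (String × String × List (String × String)) :=
  [("corrections", "**Corrections grammaticales:**",
    [("- Erreur: ", "erreur"), ("  Correction: ", "correction"), ("  Type: ", "type")]),
   ("suggestions", "**Suggestions de style:**",
    [("- Original: ", "original"), ("  Suggestion: ", "suggestion"), ("  Type: ", "type")]),
   ("ajustements", "**Ajustements de ton:**",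
    [("- Original: ", "original"), ("  Ajustement: ", "ajustement"), ("  Type: ", "type")]),
   ("suggestions_generales", "**Suggestions générales:**",
    [("- Original: ", "original"), ("  Suggestion: ", "suggestion"), ("  Type: ", "type")])]

def formater_resultat_alt (result : List (String × List (List (String × String)))) : String :=
  let parts : List String :=
    pvSections.foldl (fun ps sec =>
      match result.lookup sec.1 with
      | none => ps
      | some items =>
          items.foldl (fun ps2 item =>
            (sec.2.2.foldl (fun ps3 lf => ps3 ++ [lf.1 ++ (item.lookup lf.2).getD "" ++ "\n"]) ps2)
              ++ ["\n"])
            (ps ++ [sec.2.1 ++ "\n"])) []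
  if parts = [] then "Aucune correction ou suggestion trouvée." else PySem.Str.join "" parts

-- ===== PRECONDITION & SPEC =====
-- Pre_ excludes exactly the inputs on which Python A raises KeyError: a present section whose
-- item dict misses one of the three fields that section's lines read.
def Pre_formater_resultat (result : List (String × List (List (String × String)))) : Prop :=
  (∀ it ∈ ((result.lookup "corrections").getD []),
      (it.lookup "erreur").isSome ∧ (it.lookup "correction").isSome ∧ (it.lookup "type").isSome) ∧
  (∀ it ∈ ((result.lookup "suggestions").getD []),
      (it.lookup "original").isSome ∧ (it.lookup "suggestion").isSome ∧ (it.lookup "type").isSome) ∧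
  (∀ it ∈ ((result.lookup "ajustements").getD []),
      (it.lookup "original").isSome ∧ (it.lookup "ajustement").isSome ∧ (it.lookup "type").isSome) ∧
  (∀ it ∈ ((result.lookup "suggestions_generales").getD []),
      (it.lookup "original").isSome ∧ (it.lookup "suggestion").isSome ∧ (it.lookup "type").isSome)
instance (result : List (String × List (List (String × String)))) : Decidable (Pre_formater_resultat result) := by
  unfold Pre_formater_resultat; infer_instance

def pvWitness_formater_resultat : (List (String × List (List (String × String)))) :=
  [("corrections", [[("erreur", "foo"), ("correction", "bar"), ("type", "orthographe")]])]

def Spec_formater_resultat (result : List (String × List (List (String × String)))) (out : String) : Prop := out = formater_resultat_alt result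
instance (result : List (String × List (List (String × String)))) (out : String) : Decidable (Spec_formater_resultat result out) := by unfold Spec_formater_resultat; infer_instance

-- ===== CLAIM (what is proved, stated in full; the proofs are below) =====
def Claim_equal_formater_resultat : Prop := ∀ (result : List (String × List (List (String × String)))), Dom_formater_resultat result → Pre_formater_resultat result → Spec_formater_resultat result (formater_resultat result)

-- ===== LEMMAS AND PROOFS =====

lemma chars_join_nil_flatten (ls : List (List Char)) : PySem.Chars.join [] ls = ls.flatten := by
  simp only [PySem.Chars.join, List.intercalate]
  induction ls with
  | nil => rfl
  | cons x xs ih => cases xs <;> simp_all [List.intersperse]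

lemma str_join_nil : PySem.Str.join "" [] = "" := rfl

lemma str_join_cons (s : String) (ps : List String) :
    PySem.Str.join "" (s :: ps) = s ++ PySem.Str.join "" ps := by
  simp [PySem.Str.join, chars_join_nil_flatten]

lemma str_join_append (ps qs : List String) :
    PySem.Str.join "" (ps ++ qs) = PySem.Str.join "" ps ++ PySem.Str.join "" qs := by
  induction ps with
  | nil => simp [str_join_nil]
  | cons x xs ih => simp [str_join_cons, ih, String.append_assoc]

lemma str_mid_ne_empty (a b c : String) (hb : b ≠ "") : a ++ b ++ c ≠ "" := by
  intro h
  have := congrArg String.toList h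
  simp [String.toList_append] at this
  exact hb this.2.1

lemma nn_split : ("\n\n" : String) = "\n" ++ "\n" := by decide

lemma pv_secLoop (l1 f1 l2 f2 l3 f3 : String) (items : List (List (String × String))) :
    ∀ (acc : String) (ps : List String), acc = PySem.Str.join "" ps →
    items.foldl (fun a it =>
        a ++ l1 ++ (it.lookup f1).getD "" ++ "\n"
          ++ l2 ++ (it.lookup f2).getD "" ++ "\n"
          ++ l3 ++ (it.lookup f3).getD "" ++ "\n\n") acc
    = PySem.Str.join "" (items.foldl (fun ps2 it =>
        ((ps2 ++ [l1 ++ (it.lookup f1).getD "" ++ "\n"]) ++ [l2 ++ (it.lookup f2).getD "" ++ "\n"])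
          ++ [l3 ++ (it.lookup f3).getD "" ++ "\n"] ++ ["\n"]) ps) := by
  induction items with
  | nil => intro acc ps h; simpa using h
  | cons it its ih =>
    intro acc ps h
    simp only [List.foldl]
    apply ih
    simp [str_join_append, str_join_cons, str_join_nil, h, nn_split, String.append_assoc]

lemma pv_secLoop_ne (l1 f1 l2 f2 l3 f3 : String) (items : List (List (String × String))) :
    ∀ (ps : List String), ps ≠ [] →
    items.foldl (fun ps2 it =>
        ((ps2 ++ [l1 ++ (it.lookup f1).getD "" ++ "\n"]) ++ [l2 ++ (it.lookup f2).getD "" ++ "\n"])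
          ++ [l3 ++ (it.lookup f3).getD "" ++ "\n"] ++ ["\n"]) ps ≠ [] := by
  induction items with
  | nil => intro ps h; simpa using h
  | cons it its ih => intro ps h; simp only [List.foldl]; apply ih; simp

lemma pv_AfoldPrefix (l1 f1 l2 f2 l3 f3 : String) (items : List (List (String × String))) :
    ∀ (acc : String), ∃ rest : String,
    items.foldl (fun a it =>
        a ++ l1 ++ (it.lookup f1).getD "" ++ "\n"
          ++ l2 ++ (it.lookup f2).getD "" ++ "\n"
          ++ l3 ++ (it.lookup f3).getD "" ++ "\n\n") acc = acc ++ rest := by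
  induction items with
  | nil => intro acc; exact ⟨"", by simp⟩
  | cons it its ih =>
    intro acc
    obtain ⟨rest, hr⟩ := ih (acc ++ l1 ++ (it.lookup f1).getD "" ++ "\n"
          ++ l2 ++ (it.lookup f2).getD "" ++ "\n"
          ++ l3 ++ (it.lookup f3).getD "" ++ "\n\n")
    refine ⟨l1 ++ ((it.lookup f1).getD "" ++ ("\n" ++ (l2 ++ ((it.lookup f2).getD "" ++ ("\n"
          ++ (l3 ++ ((it.lookup f3).getD "" ++ ("\n\n" ++ rest)))))))), ?_⟩
    simp only [List.foldl]
    rw [hr]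
    simp [String.append_assoc]

lemma pv_optStep (o : Option (List (List (String × String))))
    (hdrA hdrB l1 f1 l2 f2 l3 f3 : String)
    (hh : hdrA = hdrB ++ "\n") (hA0 : hdrA ≠ "")
    (acc : String) (ps : List String)
    (h : acc = PySem.Str.join "" ps) (h2 : acc = "" ↔ ps = []) :
    ((match o with
      | none => acc
      | some items =>
          items.foldl (fun a it =>
            a ++ l1 ++ (it.lookup f1).getD "" ++ "\n"
              ++ l2 ++ (it.lookup f2).getD "" ++ "\n"
              ++ l3 ++ (it.lookup f3).getD "" ++ "\n\n") (acc ++ hdrA))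
      = PySem.Str.join ""
        (match o with
         | none => ps
         | some items =>
             items.foldl (fun ps2 it =>
               (([(l1, f1), (l2, f2), (l3, f3)] : List (String × String)).foldl
                   (fun ps3 lf => ps3 ++ [lf.1 ++ (it.lookup lf.2).getD "" ++ "\n"]) ps2)
                 ++ ["\n"]) (ps ++ [hdrB ++ "\n"])))
    ∧ ((match o with
        | none => acc
        | some items =>
            items.foldl (fun a it =>
              a ++ l1 ++ (it.lookup f1).getD "" ++ "\n"
                ++ l2 ++ (it.lookup f2).getD "" ++ "\n"
                ++ l3 ++ (it.lookup f3).getD "" ++ "\n\n") (acc ++ hdrA)) = ""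
       ↔ (match o with
          | none => ps
          | some items =>
              items.foldl (fun ps2 it =>
                (([(l1, f1), (l2, f2), (l3, f3)] : List (String × String)).foldl
                    (fun ps3 lf => ps3 ++ [lf.1 ++ (it.lookup lf.2).getD "" ++ "\n"]) ps2)
                  ++ ["\n"]) (ps ++ [hdrB ++ "\n"])) = []) := by
  cases o with
  | none => exact ⟨h, h2⟩
  | some items =>
    simp only [List.foldl]
    have main := pv_secLoop l1 f1 l2 f2 l3 f3 items (acc ++ hdrA) (ps ++ [hdrB ++ "\n"])
      (by simp [str_join_append, str_join_cons, str_join_nil, h, hh])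
    have hB := pv_secLoop_ne l1 f1 l2 f2 l3 f3 items (ps ++ [hdrB ++ "\n"]) (by simp)
    obtain ⟨rest, hr⟩ := pv_AfoldPrefix l1 f1 l2 f2 l3 f3 items (acc ++ hdrA)
    have hA : items.foldl (fun a it =>
            a ++ l1 ++ (it.lookup f1).getD "" ++ "\n"
              ++ l2 ++ (it.lookup f2).getD "" ++ "\n"
              ++ l3 ++ (it.lookup f3).getD "" ++ "\n\n") (acc ++ hdrA) ≠ "" := by
      rw [hr]; exact str_mid_ne_empty acc hdrA rest hA0
    exact ⟨main, iff_of_false hA hB⟩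

-- ===== VERDICT (by name: the statement is the Claim_ definition above) =====
theorem formater_resultat_spec : Claim_equal_formater_resultat := by
  intro result _ _
  unfold Spec_formater_resultat
  show formater_resultat result = formater_resultat_alt result
  unfold formater_resultat formater_resultat_alt pvSections
  simp only [List.foldl]
  have s1 := pv_optStep (result.lookup "corrections")
    "**Corrections grammaticales:**\n" "**Corrections grammaticales:**"
    "- Erreur: " "erreur" "  Correction: " "correction" "  Type: " "type"
    rfl (by decide) "" [] rfl (by simp)
  have s2 := pv_optStep (result.lookup "suggestions")
    "**Suggestions de style:**\n" "**Suggestions de style:**"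
    "- Original: " "original" "  Suggestion: " "suggestion" "  Type: " "type"
    rfl (by decide) _ _ s1.1 s1.2
  have s3 := pv_optStep (result.lookup "ajustements")
    "**Ajustements de ton:**\n" "**Ajustements de ton:**"
    "- Original: " "original" "  Ajustement: " "ajustement" "  Type: " "type"
    rfl (by decide) _ _ s2.1 s2.2
  have s4 := pv_optStep (result.lookup "suggestions_generales")
    "**Suggestions générales:**\n" "**Suggestions générales:**"
    "- Original: " "original" "  Suggestion: " "suggestion" "  Type: " "type"
    rfl (by decide) _ _ s3.1 s3.2
  rw [s4.1]
  have hiff := s4.1 ▸ s4.2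
  split_ifs with h1 h2 h3
  · rfl
  · exact absurd (hiff.mp h1) h2
  · exact absurd (hiff.mpr h3) h1
  · rfl
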